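-- pv_equiv track=rewrite | github.com/marcevrard/pyNLP_HTS | my_defs/defs_list.py | get_2d_dic_items
-- ===== SOURCE A (Python) =====
-- def get_2d_dic_items(dic_2d):
--     """Get all values and keys from 2D dict and return a dict of lists with the ordered unique values of the keys.
--     For example get all values from a parsed xml file.
--     """
--     lst_out_k = []
--     for row_v in dic_2d.values():
--         lst_k = list(row_v.keys())
--         for k in lst_k:
--             if k not in lst_out_k:
--                 lst_out_k.append(k)
--
--     lst_out_k.sort()
--
--     lst_row_k = list(dic_2d.keys())
--     lst_out = []
--     for key in lst_out_k:
--         lst_out_v = []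
--         for row_k in lst_row_k:
--             if key in dic_2d[row_k].keys():
--                 v = dic_2d[row_k][key]
--                 if v not in lst_out_v:
--                     lst_out_v.append(v)
--         lst_out_v.sort()
--         lst_out.append([key, lst_out_v])
--
--     dic_out_ldic = dict(lst_out)
--
--     return dic_out_ldic
-- ===== SOURCE B (Python) =====
-- def get_2d_dic_items(dic_2d):
--     """Single pass: group each inner value into a set keyed by its inner key, then sort keys and each value set."""
--     agg = {}
--     for row in dic_2d.values():
--         for k, v in row.items():
--             agg.setdefault(k, set()).add(v)
--     return {k: sorted(agg[k]) for k in sorted(agg)}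
-- ===== Notes on version B (the rewrite author's own statement) =====
-- stated objective: faster
-- what changed: A rescans every row for every collected inner key (with list-membership dedup); B makes one pass grouping values into a dict of sets keyed by inner key, then sorts the keys and each value set.
import Mathlib
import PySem

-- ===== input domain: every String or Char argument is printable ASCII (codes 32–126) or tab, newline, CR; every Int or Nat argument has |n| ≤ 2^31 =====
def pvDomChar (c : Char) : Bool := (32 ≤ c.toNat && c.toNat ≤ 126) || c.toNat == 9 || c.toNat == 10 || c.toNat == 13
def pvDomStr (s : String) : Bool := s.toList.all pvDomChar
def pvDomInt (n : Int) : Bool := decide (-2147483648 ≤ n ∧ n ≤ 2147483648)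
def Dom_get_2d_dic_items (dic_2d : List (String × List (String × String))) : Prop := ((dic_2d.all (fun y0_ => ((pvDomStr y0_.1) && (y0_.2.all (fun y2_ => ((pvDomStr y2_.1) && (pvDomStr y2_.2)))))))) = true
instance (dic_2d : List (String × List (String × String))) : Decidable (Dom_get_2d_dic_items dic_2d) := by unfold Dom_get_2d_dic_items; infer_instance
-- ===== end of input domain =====

-- B replaces A's per-collected-key rescan of all rows by one grouping pass into a dict of sets,
-- then sorts the keys and each value set; objective: faster (asymptotic).

-- Both programs receive a Python dict[str, dict[str, str]]; decoding the association-list argument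
-- into PySem.Dict (at both levels, Python dict construction semantics) is shared input decoding,
-- not part of either algorithm.
def pvDecode (dic_2d : List (String × List (String × String))) : PySem.Dict String (PySem.Dict String String) :=
  PySem.Dict.ofList (dic_2d.map (fun p => (p.1, PySem.Dict.ofList p.2)))

-- ===== PORT A =====
-- Literal transliteration of A. 'dic_2d[row_k]' is guarded by 'row_k ∈ dic_2d.keys', so getD's
-- default is never read; likewise 'dic_2d[row_k][key]' is guarded by the contains test. A's final
-- 'dict(lst_out)' is the identity on the items list here (its keys are already distinct).
def get_2d_dic_items (dic_2d : List (String × List (String × String))) : List (String × List String) :=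
  let d := pvDecode dic_2d
  let lst_out_k : List String :=
    d.values.foldl (fun acc row_v =>
      row_v.keys.foldl (fun acc k => if k ∈ acc then acc else acc ++ [k]) acc) []
  let lst_out_k := PySem.List.sorted lst_out_k (fun x => x) false
  let lst_row_k := d.keys
  lst_out_k.foldl (fun lst_out key =>
    let lst_out_v : List String :=
      lst_row_k.foldl (fun acc row_k =>
        let row := d.getD row_k PySem.Dict.empty
        if row.contains key then
          let v := row.getD key ""
          if v ∈ acc then acc else acc ++ [v]
        else acc) []
    lst_out ++ [(key, PySem.List.sorted lst_out_v (fun x => x) false)]) []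

-- ===== PORT B =====
-- Literal transliteration of Source B: one grouping pass into a dict of sets, then sort.
def get_2d_dic_items_alt (dic_2d : List (String × List (String × String))) : List (String × List String) :=
  let d := pvDecode dic_2d
  let agg : PySem.Dict String (PySem.Set String) :=
    d.values.foldl (fun agg row =>
      row.items.foldl (fun agg kv => agg.modify kv.1 [] (fun s => PySem.Set.add s kv.2)) agg)
      PySem.Dict.empty
  (PySem.List.sorted agg.keys (fun x => x) false).map
    (fun k => (k, PySem.List.sorted (agg.getD k []) (fun x => x) false))

-- ===== PRECONDITION & SPEC =====
def Spec_get_2d_dic_items (dic_2d : List (String × List (String × String))) (out : List (String × List String)) : Prop := out = get_2d_dic_items_alt dic_2d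
instance (dic_2d : List (String × List (String × String))) (out : List (String × List String)) : Decidable (Spec_get_2d_dic_items dic_2d out) := by unfold Spec_get_2d_dic_items; infer_instance

-- ===== CLAIM (what is proved, stated in full; the proofs are below) =====
def Claim_equal_get_2d_dic_items : Prop := ∀ (dic_2d : List (String × List (String × String))), Dom_get_2d_dic_items dic_2d → Spec_get_2d_dic_items dic_2d (get_2d_dic_items dic_2d)

-- ===== LEMMAS AND PROOFS =====

-- looking up key k after B's modify-loop over an item list is a fold over the matching values
theorem pv_getD_fold_modify (k : String) (l : List (String × String)) (d : PySem.Dict String (PySem.Set String)) :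
    (l.foldl (fun d kv => d.modify kv.1 [] (fun s => PySem.Set.add s kv.2)) d).getD k []
    = l.foldl (fun s kv => if kv.1 = k then PySem.Set.add s kv.2 else s) (d.getD k []) := by
  induction l generalizing d with
  | nil => rfl
  | cons kv t ih =>
    simp only [List.foldl_cons, ih]
    congr 1
    rw [PySem.Dict.getD_modify]
    by_cases h : kv.1 = k
    · subst h; simp
    · rw [if_neg (fun hh => h hh.symm), if_neg h]

-- on a Nodup-keys item list, filtering by key k yields the (at most one) matching item
theorem pv_filter_items (k : String) (l : List (String × String)) (h : (l.map (·.1)).Nodup) :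
    l.filter (fun kv => decide (kv.1 = k))
    = (Option.map (fun p => p.2) (l.find? (fun p => p.1 == k))).elim [] (fun v => [(k, v)]) := by
  induction l with
  | nil => rfl
  | cons kv t ih =>
    simp only [List.map_cons, List.nodup_cons] at h
    by_cases hk : kv.1 = k
    · subst hk
      simp only [List.filter_cons, decide_true, List.find?_cons, beq_self_eq_true, if_pos]
      have ht : t.filter (fun kv' => decide (kv'.1 = kv.1)) = [] := by
        rw [List.filter_eq_nil_iff]
        intro a ha
        simp only [decide_eq_true_eq]
        intro hc
        exact h.1 (by rw [← hc]; exact List.mem_map_of_mem ha)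
      simp [ht]
    · have hb : (kv.1 == k) = false := by simp [hk]
      simp only [List.filter_cons, List.find?_cons, hb, decide_eq_true_eq, if_neg hk]
      exact ih h.2

-- per-row effect of the matching-values fold, phrased through the row dict's API
theorem pv_row_values (row : PySem.Dict String String) (k : String) (s0 : PySem.Set String)
    (h : row.keys.Nodup) :
    row.items.foldl (fun s kv => if kv.1 = k then PySem.Set.add s kv.2 else s) s0
    = if row.contains k then PySem.Set.add s0 (row.getD k "") else s0 := by
  rw [PySem.List.foldl_ite_eq_foldl_filter, pv_filter_items k row.items h]
  cases hf : row.items.find? (fun p => p.1 == k) with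
  | none =>
    have hc : row.contains k = false := by
      simp only [PySem.Dict.contains]
      rw [List.any_eq_false]
      intro p hp
      exact (List.find?_eq_none.mp hf) p hp
    simp [hc]
  | some p =>
    have hc : row.contains k = true := by
      simp only [PySem.Dict.contains]
      rw [List.any_eq_true]
      exact ⟨p, List.mem_of_find?_eq_some hf, by have := List.find?_some hf; exact this⟩
    have hg : row.getD k "" = p.2 := by
      simp [PySem.Dict.getD, PySem.Dict.get?, hf]
    simp [hc, hg]

-- the keys of B's grouping dict grow exactly as A's ordered-dedup key list
theorem pv_keys_eq (rows : List (PySem.Dict String String)) (agg : PySem.Dict String (PySem.Set String)) :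
    (rows.foldl (fun agg row =>
        row.items.foldl (fun agg kv => agg.modify kv.1 [] (fun s => PySem.Set.add s kv.2)) agg) agg).keys
    = rows.foldl (fun acc row =>
        row.keys.foldl (fun acc k => if k ∈ acc then acc else acc ++ [k]) acc) agg.keys := by
  induction rows generalizing agg with
  | nil => rfl
  | cons row t ih =>
    simp only [List.foldl_cons, ih]
    congr 1
    rw [PySem.Dict.keys_foldl_modify_key row.items (fun kv => kv.1) [] (fun _ kv => fun s => PySem.Set.add s kv.2) agg]
    rw [PySem.List.foldl_congr_mem _ _ PySem.Set.add _ (by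
      intro acc x hx
      exact (PySem.Set.add_eq_ite acc x).symm)]
    rfl

-- per inner key k, B's grouped set is exactly A's ordered-dedup value list for k
theorem pv_val_eq (k : String) (rows : List (PySem.Dict String String))
    (h : ∀ r ∈ rows, r.keys.Nodup) (agg : PySem.Dict String (PySem.Set String)) :
    (rows.foldl (fun agg row =>
        row.items.foldl (fun agg kv => agg.modify kv.1 [] (fun s => PySem.Set.add s kv.2)) agg) agg).getD k []
    = rows.foldl (fun acc row =>
        if row.contains k then (if row.getD k "" ∈ acc then acc else acc ++ [row.getD k ""]) else acc)
        (agg.getD k []) := by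
  induction rows generalizing agg with
  | nil => rfl
  | cons row t ih =>
    simp only [List.foldl_cons]
    rw [ih (fun r hr => h r (List.mem_cons_of_mem _ hr))]
    congr 1
    rw [pv_getD_fold_modify, pv_row_values row k _ (h row (List.mem_cons_self))]
    by_cases hc : row.contains k = true
    · rw [if_pos hc, if_pos hc, PySem.Set.add_eq_ite]
    · rw [if_neg hc, if_neg hc]

-- every value of a dict built by an insert loop comes from the inserted pairs (or the start dict)
theorem pv_mem_values_foldl_insert {ν : Type} [DecidableEq ν]
    (l : List (String × ν)) (d : PySem.Dict String ν) (w : ν)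
    (hw : w ∈ (l.foldl (fun acc p => acc.insert p.1 p.2) d).values) :
    w ∈ d.values ∨ w ∈ l.map (·.2) := by
  induction l generalizing d with
  | nil => exact Or.inl hw
  | cons p t ih =>
    simp only [List.foldl_cons] at hw
    rcases ih (d.insert p.1 p.2) hw with h1 | h2
    · rcases PySem.Dict.mem_values_insert d p.1 p.2 w h1 with h | h
      · exact Or.inr (by simp [h])
      · exact Or.inl h
    · exact Or.inr (List.mem_cons_of_mem _ h2)

-- every row dict of the decoded input has Nodup keys (it is a Dict.ofList)
theorem pv_rows_nodup (dic_2d : List (String × List (String × String)))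
    (r : PySem.Dict String String) (hr : r ∈ (pvDecode dic_2d).values) : r.keys.Nodup := by
  have h := pv_mem_values_foldl_insert (dic_2d.map (fun p => (p.1, PySem.Dict.ofList p.2))) PySem.Dict.empty r
    (by simpa [pvDecode, PySem.Dict.ofList, PySem.Dict.update] using hr)
  rcases h with h | h
  · simp [PySem.Dict.empty, PySem.Dict.values] at h
  · simp only [List.map_map, List.mem_map] at h
    obtain ⟨p, _, hp⟩ := h
    rw [← hp]
    exact PySem.Dict.nodup_keys_ofList p.2

-- A's fold over dic_2d.keys with lookups is a fold over dic_2d.values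
theorem pv_fold_keys_values {β : Type} (d : PySem.Dict String (PySem.Dict String String))
    (hnd : d.keys.Nodup) (g : β → PySem.Dict String String → β) (init : β) :
    d.keys.foldl (fun acc rk => g acc (d.getD rk PySem.Dict.empty)) init = d.values.foldl g init := by
  rw [PySem.Dict.values_eq_map_keys d hnd PySem.Dict.empty, List.foldl_map]

-- ===== VERDICT (by name: the statement is the Claim_ definition above) =====
theorem get_2d_dic_items_spec : Claim_equal_get_2d_dic_items := by
  intro dic_2d _
  unfold Spec_get_2d_dic_items get_2d_dic_items get_2d_dic_items_alt
  simp only []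
  rw [PySem.List.foldl_append_singleton_eq_map
    (f := fun key => (key, PySem.List.sorted
      ((pvDecode dic_2d).keys.foldl (fun acc row_k =>
        if ((pvDecode dic_2d).getD row_k PySem.Dict.empty).contains key then
          (if ((pvDecode dic_2d).getD row_k PySem.Dict.empty).getD key "" ∈ acc then acc
           else acc ++ [((pvDecode dic_2d).getD row_k PySem.Dict.empty).getD key ""])
        else acc) []) (fun x => x) false))]
  rw [List.nil_append]
  have hnd : (pvDecode dic_2d).keys.Nodup := PySem.Dict.nodup_keys_ofList _
  have hrows : ∀ r ∈ (pvDecode dic_2d).values, r.keys.Nodup := pv_rows_nodup dic_2d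
  have hkeys := pv_keys_eq (pvDecode dic_2d).values PySem.Dict.empty
  rw [PySem.Dict.keys_empty] at hkeys
  rw [← hkeys]
  apply List.map_congr_left
  intro k _
  have hval := pv_val_eq k (pvDecode dic_2d).values hrows PySem.Dict.empty
  rw [PySem.Dict.getD_empty] at hval
  rw [hval, pv_fold_keys_values (pvDecode dic_2d) hnd
    (fun acc row => if row.contains k then (if row.getD k "" ∈ acc then acc else acc ++ [row.getD k ""]) else acc) []]
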